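-- pv_equiv track=rewrite | github.com/shahpn/ChopShop | finalProjectGrocery.py | genAisleList
-- ===== SOURCE A (Python) =====
-- def genAisleList(groceryList, aisleContents, requiredAisles=['Entrance'], i='Aisle 1'):
--     # Base case, once the list is empty we have our aisles
--
--     if len(groceryList) == 0:
--         requiredAisles.append('Checkout')
--         return requiredAisles
--
--     # Checks first to see if the chosen aisle has any of the items on our list
--
--     if len(set(aisleContents[i]).intersection(set(groceryList))) != 0:
--
--         removeItems = set(aisleContents[i]).intersection(
--             set(groceryList))  # List of items to remove from the grocery list
--         requiredAisles.append(
--             i)  # Adds the aisle to the list of places we NEED to see bc it's just so pretty and worth the money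
--         # temp = list(aisleContents)                                         # This was a dumb test ignore it
--
--         # We now remove the items from our list that also exist in our current aisle
--
--         for item in removeItems:
--             groceryList.remove(item)
--
--         # If we're at the end of our aisle, we do one last check. If we are at the end, returns our required MUST SEE aisles
--         if i != 'Aisle 13':
--             index = list(aisleContents)[list(aisleContents).index(i) + 1]
--             return genAisleList(groceryList, aisleContents, requiredAisles, index)
--
--         else:
--             requiredAisles.append('Checkout')
--             return requiredAisles
--
--
--     # This is for when the aisle is a miserable failure with nothing that we want.
--     # Does the same check for aisle 13 to avoid falling into the abyss
--
--     else:
--         if i != 'Aisle 13':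
--             index = list(aisleContents)[list(aisleContents).index(i) + 1]
--             return genAisleList(groceryList, aisleContents, requiredAisles, index)
--
--         else:
--             requiredAisles.append('Checkout')
--             return requiredAisles
-- ===== SOURCE B (Python) =====
-- # B: single explicit loop over the slice of dict keys starting at i, instead of tail
-- # recursion that rebuilds list(aisleContents) and re-runs .index at every step.
-- # Mutates groceryList and requiredAisles the same way A does.
-- def genAisleList(groceryList, aisleContents, requiredAisles=['Entrance'], i='Aisle 1'):
--     if not groceryList:
--         requiredAisles.append('Checkout')
--         return requiredAisles
--     keys = list(aisleContents)
--     for aisle in keys[keys.index(i):]: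
--         found = set(aisleContents[aisle]) & set(groceryList)
--         if found:
--             requiredAisles.append(aisle)
--             for item in found:
--                 groceryList.remove(item)
--         if not groceryList or aisle == 'Aisle 13':
--             requiredAisles.append('Checkout')
--             return requiredAisles
-- ===== Notes on version B (the rewrite author's own statement) =====
-- stated objective: simpler
-- what changed: Replaces A's tail recursion, which rebuilds list(aisleContents) and re-runs .index on every step and duplicates the advance/checkout logic in both branches, by a single for-loop over the slice of dict keys starting at i.
import Mathlib
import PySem

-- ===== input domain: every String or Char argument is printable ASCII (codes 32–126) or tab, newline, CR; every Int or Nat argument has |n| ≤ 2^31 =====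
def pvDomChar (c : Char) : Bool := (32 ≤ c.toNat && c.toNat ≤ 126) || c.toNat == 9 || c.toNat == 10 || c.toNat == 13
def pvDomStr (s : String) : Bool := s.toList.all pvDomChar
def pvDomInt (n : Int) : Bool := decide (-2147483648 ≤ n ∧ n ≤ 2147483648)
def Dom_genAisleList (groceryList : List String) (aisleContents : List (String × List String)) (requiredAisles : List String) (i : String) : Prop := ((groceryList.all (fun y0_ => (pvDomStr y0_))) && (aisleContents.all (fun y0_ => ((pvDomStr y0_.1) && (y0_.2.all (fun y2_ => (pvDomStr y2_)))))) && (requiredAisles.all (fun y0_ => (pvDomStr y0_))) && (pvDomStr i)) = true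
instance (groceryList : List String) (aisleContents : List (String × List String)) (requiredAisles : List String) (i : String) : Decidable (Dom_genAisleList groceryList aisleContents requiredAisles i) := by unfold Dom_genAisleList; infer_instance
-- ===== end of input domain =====

-- B replaces A's tail recursion (which rebuilds list(aisleContents) and re-runs .index at
-- every step) by one explicit pass over the slice of dict keys starting at i: simpler.
-- Both Pythons mutate groceryList and requiredAisles identically; the theorems are about the return value.

-- ===== PORT A =====

-- removal loop 'for item in removeItems: groceryList.remove(item)'; removeItems holds
-- distinct values all present in the list, so the result does not depend on Python's
-- (unmodelled) set iteration order and the .getD guard is never hit under Pre_.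
def pvRemoveEach (g : List String) (items : List String) : List String :=
  items.foldl (fun g it => (PySem.List.remove? g it).getD g) g

-- fuelled transliteration of A's recursion; fuel (length of the dict + 1) is enough under
-- Pre_genAisleList, and the [] at fuel 0 / on a failed lookup marks exactly where Python raises.
def genAisleListA : Nat → List String → List (String × List String) → List String → String → List String
  | 0, _, _, _, _ => []
  | Nat.succ f, groceryList, aisleContents, requiredAisles, i =>
    if groceryList.length = 0 then requiredAisles ++ ["Checkout"]
    else
      match (PySem.Dict.mk aisleContents).get? i with
      | none => []  -- KeyError on aisleContents[i]: excluded by Pre_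
      | some contents =>
        let removeItems := PySem.Set.inter (PySem.Set.ofList contents) (PySem.Set.ofList groceryList)
        if removeItems.length ≠ 0 then
          let requiredAisles' := requiredAisles ++ [i]
          let groceryList' := pvRemoveEach groceryList removeItems
          if i ≠ "Aisle 13" then
            match PySem.List.index? (aisleContents.map Prod.fst) i with
            | none => []  -- ValueError on .index: excluded by Pre_
            | some idx =>
              match (aisleContents.map Prod.fst)[idx + 1]? with  -- list[idx+1], idx+1 ≥ 0 so plain indexing is exact
              | none => []  -- IndexError past the last key: excluded by Pre_
              | some index => genAisleListA f groceryList' aisleContents requiredAisles' index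
          else requiredAisles' ++ ["Checkout"]
        else
          if i ≠ "Aisle 13" then
            match PySem.List.index? (aisleContents.map Prod.fst) i with
            | none => []
            | some idx =>
              match (aisleContents.map Prod.fst)[idx + 1]? with
              | none => []
              | some index => genAisleListA f groceryList aisleContents requiredAisles index
          else requiredAisles ++ ["Checkout"]

def genAisleList (groceryList : List String) (aisleContents : List (String × List String)) (requiredAisles : List String) (i : String) : List String :=
  genAisleListA (aisleContents.length + 1) groceryList aisleContents requiredAisles i

-- ===== PORT B =====

-- 'for aisle in keys[keys.index(i):]' of Source B; [] on a failed lookup / exhausted loop marks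
-- where the Python raises KeyError resp. falls off returning None — both outside Pre_.
def genAisleListBLoop (aisleContents : List (String × List String)) : List String → List String → List String → List String
  | _, _, [] => []
  | groceryList, requiredAisles, aisle :: rest =>
    match (PySem.Dict.mk aisleContents).get? aisle with
    | none => []
    | some contents =>
      let found := PySem.Set.inter (PySem.Set.ofList contents) (PySem.Set.ofList groceryList)
      let groceryList' := if found.length ≠ 0 then pvRemoveEach groceryList found else groceryList
      let requiredAisles' := if found.length ≠ 0 then requiredAisles ++ [aisle] else requiredAisles
      if groceryList'.isEmpty || aisle == "Aisle 13" then requiredAisles' ++ ["Checkout"]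
      else genAisleListBLoop aisleContents groceryList' requiredAisles' rest

def genAisleList_alt (groceryList : List String) (aisleContents : List (String × List String)) (requiredAisles : List String) (i : String) : List String :=
  if groceryList.isEmpty then requiredAisles ++ ["Checkout"]
  else
    match PySem.List.index? (aisleContents.map Prod.fst) i with
    | none => []  -- ValueError on keys.index(i): excluded by Pre_
    | some idx => genAisleListBLoop aisleContents groceryList requiredAisles ((aisleContents.map Prod.fst).drop idx)

-- ===== PRECONDITION & SPEC =====

-- Pre_ is exactly where A returns: the grocery list is empty, or i is a key and the walk from i
-- terminates — it reaches 'Aisle 13', or the grocery list empties strictly before the last key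
-- (each item occurs in at least as many of those aisles as it has copies); otherwise A raises
-- KeyError/IndexError while walking off the end.  The Nodup conjunct excludes nothing a Python
-- dict can produce (dict keys are always distinct).
def Pre_genAisleList (groceryList : List String) (aisleContents : List (String × List String)) (requiredAisles : List String) (i : String) : Prop :=
  groceryList = [] ∨
    ((aisleContents.map Prod.fst).Nodup ∧ i ∈ aisleContents.map Prod.fst ∧
      ("Aisle 13" ∈ (aisleContents.map Prod.fst).drop ((aisleContents.map Prod.fst).idxOf i) ∨
        ∀ item ∈ groceryList,
          groceryList.count item ≤
            (((aisleContents.drop ((aisleContents.map Prod.fst).idxOf i)).dropLast).filter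
              (fun p => decide (item ∈ p.2))).length))

instance (groceryList : List String) (aisleContents : List (String × List String)) (requiredAisles : List String) (i : String) : Decidable (Pre_genAisleList groceryList aisleContents requiredAisles i) := by unfold Pre_genAisleList; infer_instance

def pvWitness_genAisleList : List String × (List (String × List String)) × List String × String :=
  (["milk", "jam"], [("Aisle 1", ["milk"]), ("Aisle 13", ["bread"])], ["Entrance"], "Aisle 1")

def Spec_genAisleList (groceryList : List String) (aisleContents : List (String × List String)) (requiredAisles : List String) (i : String) (out : List String) : Prop := out = genAisleList_alt groceryList aisleContents requiredAisles i
instance (groceryList : List String) (aisleContents : List (String × List String)) (requiredAisles : List String) (i : String) (out : List String) : Decidable (Spec_genAisleList groceryList aisleContents requiredAisles i out) := by unfold Spec_genAisleList; infer_instance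

-- ===== CLAIM (what is proved, stated in full; the proofs are below) =====
def Claim_equal_genAisleList : Prop := ∀ (groceryList : List String) (aisleContents : List (String × List String)) (requiredAisles : List String) (i : String), Dom_genAisleList groceryList aisleContents requiredAisles i → Pre_genAisleList groceryList aisleContents requiredAisles i → Spec_genAisleList groceryList aisleContents requiredAisles i (genAisleList groceryList aisleContents requiredAisles i)

-- ===== LEMMAS AND PROOFS =====

-- a key of the dict has a value; under Nodup it is the paired value
theorem pv_get?_val (ac : List (String × List String)) (n : Nat) (hnd : (ac.map Prod.fst).Nodup)
    (hna : n < ac.length) : (PySem.Dict.mk ac).get? (ac[n].1) = some (ac[n].2) := by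
  refine PySem.Dict.get?_of_mem_items _ ?_ ?_
  · show (ac[n].1, ac[n].2) ∈ ac
    simpa using List.getElem_mem hna
  · simpa [PySem.Dict.keys_mk] using hnd

-- on a duplicate-free list, .index of the n-th element is n
theorem pv_idx (l : List String) (n : Nat) (hnd : l.Nodup) (h : n < l.length) :
    PySem.List.index? l l[n] = some n := by
  rw [PySem.List.index?_eq_idxOf?, List.idxOf?_eq_some_iff]
  refine ⟨h, rfl, ?_⟩
  intro j hj hc
  exact absurd ((List.Nodup.getElem_inj_iff hnd).mp hc) (by omega)

-- counting after the removal loop: each distinct present item loses exactly one copy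
theorem pv_count_removeEach (items : List String) : ∀ (g : List String), items.Nodup →
    (∀ x ∈ items, x ∈ g) → ∀ a,
    (pvRemoveEach g items).count a = g.count a - (if a ∈ items then 1 else 0) := by
  induction items with
  | nil => intro g _ _ a; simp [pvRemoveEach]
  | cons it rest ih =>
    intro g hnd hmem a
    have hit : it ∈ g := hmem it (by simp)
    have hstep : pvRemoveEach g (it :: rest) = pvRemoveEach (g.erase it) rest := by
      simp [pvRemoveEach, PySem.List.remove?_eq_some_erase g it hit]
    have hrest : ∀ x ∈ rest, x ∈ g.erase it := by
      intro x hx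
      exact (List.mem_erase_of_ne (fun h => (List.nodup_cons.mp hnd).1 (by rwa [h] at hx))).mpr
        (hmem x (List.mem_cons_of_mem _ hx))
    rw [hstep, ih (g.erase it) (List.Nodup.of_cons hnd) hrest a, List.count_erase]
    by_cases hai : a = it
    · have hitr : it ∉ rest := (List.nodup_cons.mp hnd).1
      simp [hai, hitr]
    · simp [hai, Ne.symm hai, List.mem_cons]

-- the walk invariant: from position n, either 'Aisle 13' lies ahead or the grocery
-- list is covered by the aisles strictly before the last one
def pvCov (ac : List (String × List String)) (n : Nat) (g : List String) : Prop :=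
  ∀ item ∈ g, g.count item ≤ (((ac.drop n).dropLast).filter (fun p => decide (item ∈ p.2))).length

-- one step of the walk preserves the coverage invariant (when nothing is found the
-- intersection is empty and pvRemoveEach changes nothing, so the same lemma covers both branches)
theorem pv_cov_step (ac : List (String × List String)) (n : Nat) (hna : n < ac.length)
    (hna1 : n + 1 < ac.length) (g : List String) (hcov : pvCov ac n g) :
    pvCov ac (n + 1) (pvRemoveEach g (PySem.Set.inter (PySem.Set.ofList ac[n].2) (PySem.Set.ofList g))) := by
  set found := PySem.Set.inter (PySem.Set.ofList ac[n].2) (PySem.Set.ofList g) with hfound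
  have hfnd : found.Nodup := PySem.Set.nodup_inter _ _ (PySem.Set.nodup_ofList _)
  have hfg : ∀ x ∈ found, x ∈ g := by
    intro x hx
    exact (PySem.Set.mem_ofList _ _).mp ((PySem.Set.mem_inter _ _ _).mp hx).2
  have hcount := pv_count_removeEach found g hfnd hfg
  intro a ha
  have hag : a ∈ g := by
    by_contra hag
    have h0 : g.count a = 0 := by
      by_contra h; exact hag (List.count_pos_iff.mp (Nat.pos_of_ne_zero h))
    have := hcount a
    have hpos : 0 < (pvRemoveEach g found).count a := List.count_pos_iff.mpr ha
    omega
  have hdtl : ac.drop (n + 1) ≠ [] := by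
    intro h
    have := congrArg List.length h
    simp [List.length_drop] at this
    omega
  have hDL : (ac.drop n).dropLast = ac[n] :: (ac.drop (n + 1)).dropLast := by
    rw [List.drop_eq_getElem_cons hna, List.dropLast_cons_of_ne_nil hdtl]
  have h2 := hcov a hag
  rw [hDL, List.filter_cons] at h2
  by_cases hav : a ∈ ac[n].2
  · have haf : a ∈ found :=
      (PySem.Set.mem_inter _ _ _).mpr ⟨(PySem.Set.mem_ofList _ _).mpr hav, (PySem.Set.mem_ofList _ _).mpr hag⟩
    rw [hcount a, if_pos haf]
    simp [hav] at h2
    omega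
  · have haf : a ∉ found := fun h =>
      hav ((PySem.Set.mem_ofList _ _).mp ((PySem.Set.mem_inter _ _ _).mp h).1)
    rw [hcount a, if_neg haf]
    simp [hav] at h2
    omega

-- the walk: from position n of the key list, with the invariant and enough fuel,
-- A's recursion and B's loop over the key suffix return the same list
theorem pv_walk (ac : List (String × List String)) (hnd : (ac.map Prod.fst).Nodup) :
    ∀ (f n : Nat) (g r : List String), g ≠ [] →
      ∀ (hn : n < (ac.map Prod.fst).length),
      ("Aisle 13" ∈ (ac.map Prod.fst).drop n ∨ pvCov ac n g) →
      (ac.map Prod.fst).length - n < f →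
      genAisleListA f g ac r ((ac.map Prod.fst)[n]'hn) =
        genAisleListBLoop ac g r ((ac.map Prod.fst).drop n) := by
  intro f
  induction f with
  | zero => intro n g r hg hn hinv hf; omega
  | succ f ih =>
    intro n g r hg hn hinv hf
    have hna : n < ac.length := by simpa using hn
    have hkn : (ac.map Prod.fst)[n]'hn = (ac[n]'hna).1 := List.getElem_map _
    have hdrop : (ac.map Prod.fst).drop n = (ac[n]'hna).1 :: (ac.map Prod.fst).drop (n + 1) := by
      rw [← hkn]; exact List.drop_eq_getElem_cons hn
    have hv : (PySem.Dict.mk ac).get? ((ac[n]'hna).1) = some ((ac[n]'hna).2) :=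
      pv_get?_val ac n hnd hna
    have hglen : ¬ g.length = 0 := by simpa using hg
    rw [hdrop, hkn]
    by_cases c13 : (ac[n]'hna).1 = "Aisle 13"
    · rw [c13] at hv
      simp only [genAisleListA, genAisleListBLoop, if_neg hglen, c13, hv]
      by_cases hF : (PySem.Set.ofList (ac[n]'hna).2).inter (PySem.Set.ofList g) = [] <;> simp [hF]
    · have hn1 : n + 1 < (ac.map Prod.fst).length := by
        rcases hinv with h13 | hcov
        · rw [hdrop] at h13
          rcases List.mem_cons.mp h13 with h | h
          · exact absurd h.symm c13
          · by_contra hcon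
            rw [List.drop_eq_nil_of_le (by omega)] at h
            exact absurd h List.not_mem_nil
        · obtain ⟨x, hxg⟩ : ∃ x, x ∈ g := by
            cases g with
            | nil => exact absurd rfl hg
            | cons y ys => exact ⟨y, by simp⟩
          have h1 : 0 < g.count x := List.count_pos_iff.mpr hxg
          have h2 := hcov x hxg
          have h3 := List.length_filter_le (fun p => decide (x ∈ p.2)) ((ac.drop n).dropLast)
          simp only [List.length_dropLast, List.length_drop] at h3
          simp only [List.length_map]
          omega
      have h13' : ("Aisle 13" ∈ (ac.map Prod.fst).drop n) →
          "Aisle 13" ∈ (ac.map Prod.fst).drop (n + 1) := by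
        intro h13
        rw [hdrop] at h13
        rcases List.mem_cons.mp h13 with h | h
        · exact absurd h.symm c13
        · exact h
      have hna1 : n + 1 < ac.length := by simpa using hn1
      have hidx := pv_idx (ac.map Prod.fst) n hnd hn
      rw [hkn] at hidx
      have hkn1 : (ac.map Prod.fst)[n + 1]'hn1 = (ac[n + 1]'hna1).1 := List.getElem_map _
      have hget2 : (ac.map Prod.fst)[n + 1]? = some ((ac[n + 1]'hna1).1) := by
        rw [List.getElem?_eq_getElem hn1, hkn1]
      have ih' : ∀ (g' r' : List String), g' ≠ [] →
          ("Aisle 13" ∈ (ac.map Prod.fst).drop (n + 1) ∨ pvCov ac (n + 1) g') →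
          genAisleListA f g' ac r' ((ac[n + 1]'hna1).1) =
            genAisleListBLoop ac g' r' ((ac.map Prod.fst).drop (n + 1)) := by
        intro g' r' hg' hinv'
        have := ih (n + 1) g' r' hg' hn1 hinv' (by simp only [List.length_map] at hf ⊢; omega)
        rwa [hkn1] at this
      simp only [genAisleListA, genAisleListBLoop, if_neg hglen, hv, hidx, hget2]
      by_cases hF : (PySem.Set.ofList (ac[n]'hna).2).inter (PySem.Set.ofList g) = []
      · -- nothing found in this aisle: state unchanged
        have hE : ¬ g.isEmpty := by simpa [List.isEmpty_iff] using hg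
        have hinv' : "Aisle 13" ∈ (ac.map Prod.fst).drop (n + 1) ∨ pvCov ac (n + 1) g := by
          rcases hinv with h13 | hcov
          · exact Or.inl (h13' h13)
          · refine Or.inr ?_
            have := pv_cov_step ac n hna hna1 g hcov
            rwa [hF, pvRemoveEach, List.foldl_nil] at this
        simp [hF, hE]
        rw [← ih' g r hg hinv']
      · by_cases hE : (pvRemoveEach g ((PySem.Set.ofList (ac[n]'hna).2).inter (PySem.Set.ofList g))).isEmpty
        · -- grocery list emptied here: A takes one more step to reach its base case
          cases f with
          | zero => simp only [List.length_map] at hf; omega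
          | succ f' =>
            simp [hF, hE, genAisleListA,
              List.length_eq_zero_iff.mpr (List.isEmpty_iff.mp hE)]
        · have hinv' : "Aisle 13" ∈ (ac.map Prod.fst).drop (n + 1) ∨
              pvCov ac (n + 1) (pvRemoveEach g ((PySem.Set.ofList (ac[n]'hna).2).inter (PySem.Set.ofList g))) := by
            rcases hinv with h13 | hcov
            · exact Or.inl (h13' h13)
            · exact Or.inr (pv_cov_step ac n hna hna1 g hcov)
          simp [hF, hE, c13]
          rw [← ih' _ _ (by simpa [List.isEmpty_iff] using hE) hinv']

-- ===== VERDICT (by name: the statement is the Claim_ definition above) =====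
theorem genAisleList_spec : Claim_equal_genAisleList := by
  intro gl ac ra i hdom hpre
  unfold Spec_genAisleList genAisleList genAisleList_alt
  by_cases hg : gl = []
  · subst hg; simp [genAisleListA]
  · rcases hpre with h | ⟨hnd, hi, hcov⟩
    · exact absurd h hg
    · have hn : (ac.map Prod.fst).idxOf i < (ac.map Prod.fst).length :=
        List.idxOf_lt_length_of_mem hi
      have hEl : (ac.map Prod.fst)[(ac.map Prod.fst).idxOf i] = i :=
        List.getElem_idxOf hn
      have hidx : PySem.List.index? (ac.map Prod.fst) i = some ((ac.map Prod.fst).idxOf i) := by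
        have := pv_idx (ac.map Prod.fst) ((ac.map Prod.fst).idxOf i) hnd hn
        rwa [hEl] at this
      rw [if_neg (by simpa [List.isEmpty_iff] using hg), hidx]
      have hw := pv_walk ac hnd (ac.length + 1) ((ac.map Prod.fst).idxOf i) gl ra hg hn
        (by exact hcov) (by simp only [List.length_map]; omega)
      rwa [hEl] at hw
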